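-- pv_equiv track=rewrite | github.com/TumanovaNelly/ITMOalgorithms | Lab-1/Task-2/src/InsertionSort.py | insertion_sort_indexes
-- ===== SOURCE A (Python) =====
-- def insertion_sort_indexes(lst: list) -> list:
-- 	output_lst = [1]
--
-- 	for i in range(1, len(lst)):
-- 		cur = i
-- 		while cur > 0 and lst[cur - 1] > lst[cur]:
-- 			lst[cur - 1], lst[cur] = lst[cur], lst[cur - 1]
-- 			cur -= 1
-- 		output_lst.append(cur + 1)
--
-- 	return output_lst
-- ===== SOURCE B (Python) =====
-- def insertion_sort_indexes(lst: list) -> list: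
--     # position of element i after stable insertion = 1 + number of earlier elements <= it
--     return [sum(1 for y in lst[:i] if y <= x) + 1 for i, x in enumerate(lst)]
-- ===== Notes on version B (the rewrite author's own statement) =====
-- stated objective: simpler
-- what changed: Replaces the swap-based insertion-sort simulation (which also mutates the input list) by a mutation-free one-liner: position of element i is 1 + the number of earlier elements <= it, counted by a builtin sum over a slice instead of Python-level element swaps.
-- intended difference: On the empty list A returns [1] (its accumulator is seeded with 1 before any element exists) while B returns [], one position per element, which is the intended shape. — e.g. on insertion_sort_indexes([]): A returns [1], B returns []
import Mathlib
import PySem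

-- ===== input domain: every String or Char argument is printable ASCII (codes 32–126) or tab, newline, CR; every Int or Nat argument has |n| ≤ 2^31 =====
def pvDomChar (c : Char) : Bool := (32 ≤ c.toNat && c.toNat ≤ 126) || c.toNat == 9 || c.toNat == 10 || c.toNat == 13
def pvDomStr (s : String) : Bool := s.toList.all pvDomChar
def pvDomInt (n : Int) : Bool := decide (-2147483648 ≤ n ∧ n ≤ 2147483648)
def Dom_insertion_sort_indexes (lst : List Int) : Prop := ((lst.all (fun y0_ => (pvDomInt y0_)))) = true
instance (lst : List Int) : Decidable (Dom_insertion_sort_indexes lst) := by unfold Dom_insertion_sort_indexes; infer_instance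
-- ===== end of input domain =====

-- B computes each final insertion position directly as 1 + count of earlier elements ≤ current,
-- instead of simulating insertion sort by swaps; A also sorts its argument in place (this claim is
-- about the RETURN value only; B does not mutate).

-- ===== PORT A =====
-- the inner while loop: 'while cur > 0 and lst[cur-1] > lst[cur]: swap; cur -= 1'.
-- Indices cur-1, cur are always in range at every use here (0 < cur < l.length), so getD is exact.
def pvWhileA (l : List Int) (cur : Nat) : List Int × Nat :=
  if 0 < cur ∧ l.getD (cur - 1) 0 > l.getD cur 0 then
    pvWhileA ((l.set (cur - 1) (l.getD cur 0)).set cur (l.getD (cur - 1) 0)) (cur - 1)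
  else (l, cur)
termination_by cur
decreasing_by omega

def insertion_sort_indexes (lst : List Int) : List Int :=
  -- output_lst = [1]; for i in range(1, len(lst)): cur = i; <while>; output_lst.append(cur + 1)
  ((PySem.List.pyRange 1 (lst.length) 1).foldl
    (fun (st : List Int × List Int) i =>
      let r := pvWhileA st.1 i.toNat
      (r.1, st.2 ++ [(r.2 : Int) + 1]))
    (lst, [1])).2

-- ===== PORT B =====
def insertion_sort_indexes_alt (lst : List Int) : List Int :=
  -- [sum(1 for y in lst[:i] if y <= x) + 1 for i, x in enumerate(lst)]  (the 0/1-sum is countP)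
  (PySem.List.enumerate lst 0).map
    (fun p => ((PySem.List.slice lst none (some p.1)).countP (fun y => y ≤ p.2) : Int) + 1)

-- ===== PRECONDITION & SPEC =====
-- On the empty list A returns [1] (its accumulator is seeded with 1 before any element exists)
-- while B returns [], one position per element, which is the intended shape.
def D_insertion_sort_indexes (lst : List Int) : Prop := lst = []
instance (lst : List Int) : Decidable (D_insertion_sort_indexes lst) := by unfold D_insertion_sort_indexes; infer_instance
def Spec_insertion_sort_indexes (lst : List Int) (out : List Int) : Prop := ¬ D_insertion_sort_indexes lst → out = insertion_sort_indexes_alt lst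
instance (lst : List Int) (out : List Int) : Decidable (Spec_insertion_sort_indexes lst out) := by unfold Spec_insertion_sort_indexes; infer_instance
def pvDiffWitness_insertion_sort_indexes : List Int := []
def pvDiffWitnessOut_insertion_sort_indexes : (List Int) × (List Int) := ([1], [])

-- ===== CLAIM (what is proved, stated in full; the proofs are below) =====
def Claim_unchanged_insertion_sort_indexes : Prop := ∀ (lst : List Int), Dom_insertion_sort_indexes lst → Spec_insertion_sort_indexes lst (insertion_sort_indexes lst)
def Claim_changed_insertion_sort_indexes : Prop := Dom_insertion_sort_indexes (pvDiffWitness_insertion_sort_indexes) ∧ D_insertion_sort_indexes (pvDiffWitness_insertion_sort_indexes) ∧ insertion_sort_indexes (pvDiffWitness_insertion_sort_indexes) = pvDiffWitnessOut_insertion_sort_indexes.1 ∧ insertion_sort_indexes_alt (pvDiffWitness_insertion_sort_indexes) = pvDiffWitnessOut_insertion_sort_indexes.2 ∧ pvDiffWitnessOut_insertion_sort_indexes.1 ≠ pvDiffWitnessOut_insertion_sort_indexes.2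
def Claim_exact_insertion_sort_indexes : Prop := ∀ (lst : List Int), Dom_insertion_sort_indexes lst → D_insertion_sort_indexes lst → insertion_sort_indexes lst ≠ insertion_sort_indexes_alt lst

-- ===== LEMMAS AND PROOFS =====

-- the while loop, started at position s.length of s ++ x :: rest with s sorted, stably inserts x
-- into s and reports the insertion position = countP (· ≤ x) s
theorem pvWhile_spec (s : List Int) (x : Int) (rest : List Int)
    (hs : s.Pairwise (· ≤ ·)) :
    pvWhileA (s ++ x :: rest) s.length =
      (s.take (s.countP (fun y => y ≤ x)) ++ x :: s.drop (s.countP (fun y => y ≤ x)) ++ rest,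
       s.countP (fun y => y ≤ x)) := by
  induction s using List.reverseRecOn generalizing rest with
  | nil => simp [pvWhileA]
  | append_singleton s' a ih =>
    have hs' : s'.Pairwise (· ≤ ·) := hs.sublist (List.sublist_append_left _ _)
    have hall : ∀ y ∈ s', y ≤ a := by
      intro y hy
      exact (List.pairwise_append.mp hs).2.2 y hy a (List.mem_singleton_self a)
    have hl : s' ++ [a] ++ x :: rest = s' ++ a :: x :: rest := by simp
    rw [pvWhileA, hl]
    have hg1 : (s' ++ a :: x :: rest).getD ((s' ++ [a]).length - 1) 0 = a := by
      simp [List.getD]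
    have hg2 : (s' ++ a :: x :: rest).getD (s' ++ [a]).length 0 = x := by
      simp [List.getD]
    by_cases hax : x < a
    · rw [if_pos ⟨by simp, by rw [hg1, hg2]; exact hax⟩]
      rw [hg1, hg2]
      have hset : ((s' ++ a :: x :: rest).set ((s' ++ [a]).length - 1) x).set (s' ++ [a]).length a
          = s' ++ x :: a :: rest := by
        simp only [List.length_append, List.length_singleton, Nat.add_sub_cancel]
        rw [List.set_append_right _ _ (by omega), List.set_append_right _ _ (by omega)]
        simp
      rw [hset]
      have hlen : (s' ++ [a]).length - 1 = s'.length := by simp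
      rw [hlen, ih (a :: rest) hs']
      have hc : (s' ++ [a]).countP (fun y => y ≤ x) = s'.countP (fun y => y ≤ x) := by
        simp [List.countP_append, not_le.mpr hax]
      have hcle : s'.countP (fun y => decide (y ≤ x)) ≤ s'.length := List.countP_le_length
      rw [hc, List.take_append_of_le_length hcle, List.drop_append_of_le_length hcle]
      simp
    · rw [if_neg (by rw [hg1, hg2]; omega)]
      have hc : (s' ++ [a]).countP (fun y => y ≤ x) = (s' ++ [a]).length := by
        apply List.countP_eq_length.mpr
        intro y hy
        rcases List.mem_append.mp hy with h | h
        · exact decide_eq_true (le_trans (hall y h) (not_lt.mp hax))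
        · simp at h; subst h; exact decide_eq_true (not_lt.mp hax)
      rw [hc]
      simp [List.take_append]

-- in a sorted list the first countP (· ≤ x) elements are ≤ x and the rest are > x
theorem sorted_take_drop (s : List Int) (x : Int) (hs : s.Pairwise (· ≤ ·)) :
    (∀ y ∈ s.take (s.countP (fun y => y ≤ x)), y ≤ x) ∧
    (∀ y ∈ s.drop (s.countP (fun y => y ≤ x)), x < y) := by
  induction s with
  | nil => simp
  | cons a t ih =>
    rcases List.pairwise_cons.mp hs with ⟨ha, ht⟩
    by_cases hax : a ≤ x
    · have hc : (a :: t).countP (fun y => y ≤ x) = t.countP (fun y => y ≤ x) + 1 := by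
        simp [hax]
      rw [hc]
      obtain ⟨h1, h2⟩ := ih ht
      refine ⟨?_, ?_⟩
      · intro y hy
        rcases List.mem_cons.mp (by simpa using hy) with h | h
        · exact h ▸ hax
        · exact h1 y (by simpa using h)
      · intro y hy
        exact h2 y (by simpa using hy)
    · have hc : (a :: t).countP (fun y => y ≤ x) = 0 := by
        apply List.countP_eq_zero.mpr
        intro y hy
        rcases List.mem_cons.mp hy with h | h
        · subst h; simpa using hax
        · simp only [decide_eq_true_eq]
          intro hyx
          exact hax (le_trans (ha y h) hyx)
      rw [hc]
      constructor
      · simp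
      · intro y hy
        rcases List.mem_cons.mp (by simpa using hy) with h | h
        · subst h; omega
        · exact lt_of_lt_of_le (by omega : x < a) (ha y h)

theorem sorted_insert (s : List Int) (x : Int) (hs : s.Pairwise (· ≤ ·)) :
    (s.take (s.countP (fun y => y ≤ x)) ++ x :: s.drop (s.countP (fun y => y ≤ x))).Pairwise (· ≤ ·) := by
  obtain ⟨h1, h2⟩ := sorted_take_drop s x hs
  apply List.pairwise_append.mpr
  refine ⟨hs.sublist (List.take_sublist _ _), ?_, ?_⟩
  · apply List.pairwise_cons.mpr
    exact ⟨fun y hy => le_of_lt (h2 y hy), hs.sublist (List.drop_sublist _ _)⟩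
  · intro a ha b hb
    rcases List.mem_cons.mp hb with h | h
    · exact h ▸ h1 a ha
    · exact le_trans (h1 a ha) (le_of_lt (h2 b h))

theorem insert_perm (s : List Int) (x : Int) (c : Nat) :
    (s.take c ++ x :: s.drop c).Perm (s ++ [x]) :=
  List.perm_middle.trans (by rw [List.take_append_drop]; exact (List.perm_append_singleton x s).symm)

theorem alt_append (l : List Int) (x : Int) :
    insertion_sort_indexes_alt (l ++ [x]) =
      insertion_sort_indexes_alt l ++ [((l.countP (fun y => y ≤ x) : Int)) + 1] := by
  unfold insertion_sort_indexes_alt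
  rw [PySem.List.enumerate_append, List.map_append]
  congr 1
  · apply List.map_congr_left
    intro p hp
    rcases (PySem.List.mem_enumerate_iff _ _ _).mp hp with ⟨k, hk, rfl⟩
    simp only [Int.zero_add]
    rw [PySem.List.slice_to_natCast, PySem.List.slice_to_natCast,
      List.take_append_of_le_length (le_of_lt hk)]
  · simp only [PySem.List.enumerate, List.map]
    have h1 : PySem.List.slice (l ++ [x]) none (some ((0 : Int) + l.length)) = (l ++ [x]).take l.length := by
      rw [Int.zero_add]; exact PySem.List.slice_to_natCast _ _
    rw [h1, List.take_append_of_le_length (le_refl _), List.take_length]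

-- invariant of the outer for loop after the iterations i = 1 .. m-1
theorem pvOuter_spec (orig : List Int) (m : Nat) (h1 : 1 ≤ m) (hm : m ≤ orig.length) :
    ∃ s : List Int, s.Pairwise (· ≤ ·) ∧ s.Perm (orig.take m) ∧
      (PySem.List.pyRange 1 (m : Int) 1).foldl
        (fun (st : List Int × List Int) i =>
          let r := pvWhileA st.1 i.toNat
          (r.1, st.2 ++ [(r.2 : Int) + 1]))
        (orig, [1]) =
      (s ++ orig.drop m, insertion_sort_indexes_alt (orig.take m)) := by
  induction m, h1 using Nat.le_induction with
  | base =>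
    obtain ⟨hd, tl, rfl⟩ : ∃ hd tl, orig = hd :: tl := by
      cases orig with
      | nil => simp at hm
      | cons hd tl => exact ⟨hd, tl, rfl⟩
    refine ⟨[hd], List.pairwise_singleton _ _, by simp, ?_⟩
    rw [PySem.List.pyRange_one_eq_nil (by norm_num)]
    simp [insertion_sort_indexes_alt, PySem.List.enumerate, PySem.List.slice]
  | succ m h1 ih =>
    obtain ⟨s, hsort, hperm, heq⟩ := ih (by omega)
    have hmlt : m < orig.length := by omega
    have hslen : s.length = m := by
      rw [hperm.length_eq, List.length_take]; omega
    have hrange : PySem.List.pyRange 1 ((m + 1 : Nat) : Int) 1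
        = PySem.List.pyRange 1 (m : Int) 1 ++ [(m : Int)] := by
      push_cast
      exact PySem.List.pyRange_one_succ_right (by exact_mod_cast h1)
    rw [hrange, List.foldl_append, heq]
    simp only [List.foldl_cons, List.foldl_nil, Int.toNat_natCast]
    have hdrop : orig.drop m = orig[m] :: orig.drop (m + 1) :=
      List.drop_eq_getElem_cons hmlt
    have hw := pvWhile_spec s orig[m] (orig.drop (m + 1)) hsort
    rw [hslen] at hw
    rw [hdrop, hw]
    set c := s.countP (fun y => y ≤ orig[m]) with hc
    refine ⟨s.take c ++ orig[m] :: s.drop c, sorted_insert s orig[m] hsort, ?_, ?_⟩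
    · refine (insert_perm s orig[m] c).trans ?_
      have htake : orig.take (m + 1) = orig.take m ++ [orig[m]] := by
        rw [List.take_add_one]
        simp [List.getElem?_eq_getElem hmlt]
      rw [htake]
      exact hperm.append_right _
    · have hcnt : (orig.take m).countP (fun y => y ≤ orig[m]) = c := (hperm.countP_eq _).symm
      have htake : orig.take (m + 1) = orig.take m ++ [orig[m]] := by
        rw [List.take_add_one]
        simp [List.getElem?_eq_getElem hmlt]
      rw [htake, alt_append, hcnt]

-- ===== VERDICT (by name: the statement is the Claim_ definition above) =====
theorem insertion_sort_indexes_spec : Claim_unchanged_insertion_sort_indexes := by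
  intro lst _ hD
  have hne : lst ≠ [] := hD
  have hlen : 1 ≤ lst.length := List.length_pos_iff.mpr hne
  obtain ⟨s, _, _, heq⟩ := pvOuter_spec lst lst.length hlen (le_refl _)
  unfold insertion_sort_indexes
  rw [heq]
  simp

theorem insertion_sort_indexes_changed : Claim_changed_insertion_sort_indexes := by
  unfold Claim_changed_insertion_sort_indexes; decide

theorem insertion_sort_indexes_tight : Claim_exact_insertion_sort_indexes := by
  intro lst _ hD
  subst hD
  decide
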